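-- pv_equiv track=rewrite | github.com/engchina/No.1-PPT-Translator | src/utils/font_manager.py | _is_font_available_detailed
-- ===== SOURCE A (Python) =====
-- def _is_font_available_detailed(font_name: str, available_families: list) -> bool:
--     """詳細なフォント可用性チェック"""
--     # 直接マッチ
--     if font_name in available_families:
--         return True
--
--     # 大文字小文字を無視してチェック
--     font_lower = font_name.lower()
--     for family in available_families:
--         if family.lower() == font_lower:
--             return True
--
--     # 部分マッチ（主要な部分が含まれているか）
--     font_keywords = font_name.lower().split()
--     for family in available_families:
--         family_lower = family.lower()
--         if all(keyword in family_lower for keyword in font_keywords):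
--             return True
--
--     # 特別なマッピング
--     special_mappings = {
--         'noto sans jp': ['noto sans cjk jp', 'source han sans', 'noto sans cjk'],
--         'noto sans sc': ['noto sans cjk sc', 'source han sans', 'noto sans cjk'],
--         'noto sans kr': ['noto sans cjk kr', 'source han sans', 'noto sans cjk'],
--         'inter': ['inter ui', 'inter variable'],
--         'segoe ui': ['segoe', 'segoe ui regular'],
--         'system-ui': ['ubuntu', 'dejavu sans', 'liberation sans', 'arial', 'helvetica']
--     }
--
--     if font_lower in special_mappings:
--         for mapping in special_mappings[font_lower]:
--             for family in available_families:
--                 if mapping in family.lower():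
--                     return True
--
--     return False
-- ===== SOURCE B (Python) =====
-- _SPECIAL_MAPPINGS = {
--     'noto sans jp': ['noto sans cjk jp', 'source han sans', 'noto sans cjk'],
--     'noto sans sc': ['noto sans cjk sc', 'source han sans', 'noto sans cjk'],
--     'noto sans kr': ['noto sans cjk kr', 'source han sans', 'noto sans cjk'],
--     'inter': ['inter ui', 'inter variable'],
--     'segoe ui': ['segoe', 'segoe ui regular'],
--     'system-ui': ['ubuntu', 'dejavu sans', 'liberation sans', 'arial', 'helvetica'],
-- }
--
--
-- def _is_font_available_detailed(font_name: str, available_families: list) -> bool: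
--     """Single-pass variant: one traversal of the families, three tests per family."""
--     if font_name in available_families:
--         return True
--     font_lower = font_name.lower()
--     keywords = font_lower.split()
--     mappings = _SPECIAL_MAPPINGS.get(font_lower, [])
--     return any(
--         fl == font_lower
--         or all(k in fl for k in keywords)
--         or any(m in fl for m in mappings)
--         for fl in (f.lower() for f in available_families)
--     )
-- ===== Notes on version B (the rewrite author's own statement) =====
-- stated objective: simpler
-- what changed: Replaces A's three sequential scans of the family list (case-insensitive equality, keyword-subset, special-mapping substring) by a single traversal that tests all three conditions per lower-cased family.
import Mathlib
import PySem

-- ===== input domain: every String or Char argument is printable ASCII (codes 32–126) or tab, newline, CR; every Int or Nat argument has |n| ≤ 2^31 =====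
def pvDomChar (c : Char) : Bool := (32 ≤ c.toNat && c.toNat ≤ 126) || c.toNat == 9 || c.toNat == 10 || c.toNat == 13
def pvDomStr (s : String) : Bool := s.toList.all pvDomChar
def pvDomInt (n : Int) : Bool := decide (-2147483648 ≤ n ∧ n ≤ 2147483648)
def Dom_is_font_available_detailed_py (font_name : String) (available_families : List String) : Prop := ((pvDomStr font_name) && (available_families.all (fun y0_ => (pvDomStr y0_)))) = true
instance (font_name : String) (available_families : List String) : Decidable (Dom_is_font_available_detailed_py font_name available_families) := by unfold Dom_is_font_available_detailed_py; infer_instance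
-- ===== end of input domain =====

-- B folds A's three sequential scans of the family list into a single traversal; objective: simpler.

-- the literal special-mappings dict shared by both sources
def pvSpecialMappings : PySem.Dict String (List String) := PySem.Dict.ofList
  [ ("noto sans jp", ["noto sans cjk jp", "source han sans", "noto sans cjk"])
  , ("noto sans sc", ["noto sans cjk sc", "source han sans", "noto sans cjk"])
  , ("noto sans kr", ["noto sans cjk kr", "source han sans", "noto sans cjk"])
  , ("inter", ["inter ui", "inter variable"])
  , ("segoe ui", ["segoe", "segoe ui regular"])
  , ("system-ui", ["ubuntu", "dejavu sans", "liberation sans", "arial", "helvetica"]) ]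

-- ===== PORT A =====
def is_font_available_detailed_py (font_name : String) (available_families : List String) : Bool :=
  if available_families.contains font_name then true
  else
    let font_lower := PySem.Str.lower font_name
    if available_families.any (fun family => PySem.Str.lower family == font_lower) then true
    else
      let font_keywords := PySem.Str.split₀ (PySem.Str.lower font_name)
      if available_families.any (fun family =>
           let family_lower := PySem.Str.lower family
           font_keywords.all (fun keyword => PySem.Str.isIn keyword family_lower)) then true
      else
        if pvSpecialMappings.contains font_lower then
          (pvSpecialMappings.getD font_lower []).any (fun mapping =>
            available_families.any (fun family => PySem.Str.isIn mapping (PySem.Str.lower family)))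
        else false

-- ===== PORT B =====
def is_font_available_detailed_py_alt (font_name : String) (available_families : List String) : Bool :=
  if available_families.contains font_name then true
  else
    let font_lower := PySem.Str.lower font_name
    let keywords := PySem.Str.split₀ font_lower
    let mappings := pvSpecialMappings.getD font_lower []
    available_families.any (fun f =>
      let fl := PySem.Str.lower f
      fl == font_lower
        || keywords.all (fun k => PySem.Str.isIn k fl)
        || mappings.any (fun m => PySem.Str.isIn m fl))

-- ===== PRECONDITION & SPEC =====
def Spec_is_font_available_detailed_py (font_name : String) (available_families : List String) (out : Bool) : Prop := out = is_font_available_detailed_py_alt font_name available_families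
instance (font_name : String) (available_families : List String) (out : Bool) : Decidable (Spec_is_font_available_detailed_py font_name available_families out) := by unfold Spec_is_font_available_detailed_py; infer_instance

-- ===== CLAIM (what is proved, stated in full; the proofs are below) =====
def Claim_equal_is_font_available_detailed_py : Prop := ∀ (font_name : String) (available_families : List String), Dom_is_font_available_detailed_py font_name available_families → Spec_is_font_available_detailed_py font_name available_families (is_font_available_detailed_py font_name available_families)

-- ===== LEMMAS AND PROOFS =====

-- an early-return chain of two guards is a disjunction
lemma pv_ifchain (a b : Bool) (x : Bool) :
    (if a = true then true else if b = true then true else x) = (a || b || x) := by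
  cases a <;> cases b <;> simp

-- three scans of the same list collapse into one scan of the disjunction
lemma pv_any_or3 {α : Type} (xs : List α) (p q r : α → Bool) :
    (xs.any p || xs.any q || xs.any r) = xs.any (fun x => p x || q x || r x) := by
  induction xs with
  | nil => simp
  | cons x t ih =>
    simp only [List.any_cons, ← ih]
    cases p x <;> cases q x <;> cases r x <;> simp

-- the two nested scans commute
lemma pv_any_swap {α β : Type} (ms : List α) (xs : List β) (f : α → β → Bool) :
    (ms.any fun m => xs.any fun x => f m x) = (xs.any fun x => ms.any fun m => f m x) := by
  rw [Bool.eq_iff_iff]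
  simp only [List.any_eq_true]
  exact ⟨fun ⟨m, hm, x, hx, h⟩ => ⟨x, hx, m, hm, h⟩,
         fun ⟨x, hx, m, hm, h⟩ => ⟨m, hm, x, hx, h⟩⟩

-- ===== VERDICT (by name: the statement is the Claim_ definition above) =====
theorem is_font_available_detailed_py_spec : Claim_equal_is_font_available_detailed_py := by
  intro font_name fams _
  unfold Spec_is_font_available_detailed_py is_font_available_detailed_py is_font_available_detailed_py_alt
  by_cases hdir : fams.contains font_name = true
  · rw [if_pos hdir, if_pos hdir]
  · rw [if_neg hdir, if_neg hdir]
    dsimp only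
    have hX : (if pvSpecialMappings.contains (PySem.Str.lower font_name) = true then
          (pvSpecialMappings.getD (PySem.Str.lower font_name) []).any (fun mapping =>
            fams.any fun family => PySem.Str.isIn mapping (PySem.Str.lower family))
        else false)
        = fams.any (fun f => (pvSpecialMappings.getD (PySem.Str.lower font_name) []).any
            (fun m => PySem.Str.isIn m (PySem.Str.lower f))) := by
      by_cases hc : pvSpecialMappings.contains (PySem.Str.lower font_name) = true
      · rw [if_pos hc, pv_any_swap]
      · rw [if_neg hc, PySem.Dict.getD_of_not_contains _ _ (Bool.eq_false_iff.mpr hc)]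
        simp
    rw [hX, pv_ifchain, pv_any_or3]
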